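-- pv_equiv track=rewrite | github.com/simoesh/urcode | urcode.py | get_dot_vars
-- ===== SOURCE A (Python) =====
-- vchars_start = 'abcdefghijklmnopqrstuvwxyzABCDEFGHIJKLMNOPQRSTUVWXYZ'
--
-- vchars = '_abcdefghijklmnopqrstuvwxyzABCDEFGHIJKLMNOPQRSTUVWXYZ0123456789'
--
-- def get_dot_vars(s):
--     vs = []
--     s1 = s.split('.')
--     for j1 in range(1, len(s1)):
--         e = len(s1[j1])
--         if e == 0: continue
--         if s1[j1][0] not in vchars_start: continue
--         for j2 in range(1, len(s1[j1])):
--             if s1[j1][j2] not in vchars: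
--                 e = j2
--                 break
--         v = s1[j1][0:e]
--         vs.append(v)
--     return vs
-- ===== SOURCE B (Python) =====
-- vchars_start = 'abcdefghijklmnopqrstuvwxyzABCDEFGHIJKLMNOPQRSTUVWXYZ'
--
-- vchars = '_abcdefghijklmnopqrstuvwxyzABCDEFGHIJKLMNOPQRSTUVWXYZ0123456789'
--
-- def get_dot_vars(s):
--     # single pass over the characters: jump from dot to dot, no split, no
--     # intermediate segment list
--     vs = []
--     i = 0
--     n = len(s)
--     while i < n:
--         if s[i] != '.':
--             i += 1
--             continue
--         i += 1
--         if i < n and s[i] in vchars_start: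
--             k = i + 1
--             while k < n and s[k] in vchars:
--                 k += 1
--             vs.append(s[i:k])
--             i = k
--     return vs
-- ===== Notes on version B (the rewrite author's own statement) =====
-- stated objective: alternative
-- what changed: A splits the string into a list of segments and then re-scans each segment with an index loop; B makes a single left-to-right pass over the characters, jumping from dot to dot and slicing each identifier out directly, never materialising the segment list.
import Mathlib
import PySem

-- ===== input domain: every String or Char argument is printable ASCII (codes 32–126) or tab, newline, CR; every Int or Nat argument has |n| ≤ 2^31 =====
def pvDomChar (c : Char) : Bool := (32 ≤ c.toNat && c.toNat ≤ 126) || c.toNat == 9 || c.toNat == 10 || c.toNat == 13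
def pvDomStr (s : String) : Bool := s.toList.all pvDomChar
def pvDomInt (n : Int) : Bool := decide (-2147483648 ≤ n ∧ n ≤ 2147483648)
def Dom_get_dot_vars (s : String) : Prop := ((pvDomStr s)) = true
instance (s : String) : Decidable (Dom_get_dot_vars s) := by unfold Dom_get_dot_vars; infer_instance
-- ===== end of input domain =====

-- B replaces A's split-into-segments-then-rescan with a single left-to-right pass that
-- jumps from dot to dot; objective: alternative (no intermediate segment list is built).

def vchars_start : List Char :=
  "abcdefghijklmnopqrstuvwxyzABCDEFGHIJKLMNOPQRSTUVWXYZ".toList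

def vchars : List Char :=
  "_abcdefghijklmnopqrstuvwxyzABCDEFGHIJKLMNOPQRSTUVWXYZ0123456789".toList

-- ===== PORT A =====
-- inner loop 'for j2 in range(1, len(seg)): if seg[j2] not in vchars: e = j2; break';
-- e starts as len(seg) and is returned unchanged when no invalid char is found
def aScan (seg : List Char) (j2 : Nat) : Nat :=
  if h : j2 < seg.length then
    if vchars.contains seg[j2] then aScan seg (j2 + 1) else j2
  else seg.length
termination_by seg.length - j2

-- s.split('.') is PySem.Chars.splitOn on s.toList (string work done on the List Char side,
-- as PySem prescribes); seg[0] is guarded by the e = 0 test exactly as in the Python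
def get_dot_vars (s : String) : List String :=
  let s1 : List (List Char) := PySem.Chars.splitOn s.toList ['.']
  (PySem.List.pyRange 1 (PySem.List.len s1)).foldl (fun vs j1 =>
    let seg := PySem.List.pyGetD s1 j1 []
    if PySem.List.len seg = 0 then vs
    else if !(vchars_start.contains (PySem.List.pyGetD seg 0 ' ')) then vs
    else
      let e := aScan seg 1
      vs ++ [String.mk (PySem.List.slice seg (some 0) (some (e : Int)))]) []

-- ===== PORT B =====
-- the outer 'while i < n' advancing one char at a time; after a '.' the inner
-- 'while k < n and s[k] in vchars' run is the takeWhile/dropWhile pair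
def bAux (l : List Char) : List String :=
  match l with
  | [] => []
  | c :: rest =>
    if c = '.' then
      match rest with
      | [] => []
      | d :: ds =>
        if vchars_start.contains d then
          String.mk (d :: ds.takeWhile (fun x => vchars.contains x)) ::
            bAux (ds.dropWhile (fun x => vchars.contains x))
        else bAux (d :: ds)
    else bAux rest
termination_by l.length
decreasing_by
  all_goals simp
  all_goals exact Nat.le_succ_of_le (List.length_dropWhile_le _ ds)

def get_dot_vars_alt (s : String) : List String := bAux s.toList

-- ===== PRECONDITION & SPEC =====
def Spec_get_dot_vars (s : String) (out : List String) : Prop := out = get_dot_vars_alt s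
instance (s : String) (out : List String) : Decidable (Spec_get_dot_vars s out) := by unfold Spec_get_dot_vars; infer_instance

-- ===== CLAIM (what is proved, stated in full; the proofs are below) =====
def Claim_equal_get_dot_vars : Prop := ∀ (s : String), Dom_get_dot_vars s → Spec_get_dot_vars s (get_dot_vars s)

-- ===== LEMMAS AND PROOFS =====

-- reference split of a char list on '.', accumulating the current segment
def msplit (pre : List Char) : List Char → List (List Char)
  | [] => [pre]
  | c :: rest => if c = '.' then pre :: msplit [] rest else msplit (pre ++ [c]) rest

-- the token a segment contributes (none = segment skipped)
def tok : List Char → Option String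
  | [] => none
  | c :: cs =>
    if vchars_start.contains c then
      some (String.mk (c :: cs.takeWhile (fun x => vchars.contains x)))
    else none

theorem go_eq (l : List Char) : ∀ (fuel : Nat) (cur : List Char) (acc : List (List Char)),
    l.length < fuel →
    PySem.Chars.splitOn.go ['.'] fuel l cur acc = acc.reverse ++ msplit cur.reverse l := by
  induction l with
  | nil =>
    intro fuel cur acc h
    match fuel with
    | fuel + 1 => simp [PySem.Chars.splitOn.go, msplit]
  | cons c rest ih =>
    intro fuel cur acc h
    match fuel with
    | fuel + 1 =>
      rw [PySem.Chars.splitOn.go]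
      by_cases hc : c = '.'
      · subst hc
        have hp : List.isPrefixOf ['.'] ('.' :: rest) = true := by simp [List.isPrefixOf]
        simp only [hp, if_pos, List.length_cons, List.length_nil, Nat.zero_add, List.drop_succ_cons, List.drop_zero]
        rw [ih fuel [] ((cur.reverse) :: acc) (by simpa using h)]
        simp [msplit]
      · have hp : List.isPrefixOf ['.'] (c :: rest) = false := by
          simp only [List.isPrefixOf, Bool.and_true]
          exact decide_eq_false (fun h' => hc h'.symm)
        simp only [hp, Bool.false_eq_true, if_false]
        rw [ih fuel (c :: cur) acc (by simpa using h)]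
        simp [msplit, hc]

theorem splitOn_eq_msplit (l : List Char) :
    PySem.Chars.splitOn l ['.'] = msplit [] l := by
  rw [PySem.Chars.splitOn, go_eq l (l.length + 1) [] [] (Nat.lt_succ_self _)]
  simp

theorem msplit_shape (l : List Char) : ∀ (pre : List Char),
    msplit pre l = (pre ++ l.takeWhile (fun c => !(c == '.'))) :: (msplit [] l).tail := by
  induction l with
  | nil => intro pre; simp [msplit]
  | cons c rest ih =>
    intro pre
    by_cases hc : c = '.'
    · subst hc; simp [msplit, List.takeWhile]
    · rw [msplit, if_neg hc, ih (pre ++ [c])]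
      rw [show msplit [] (c :: rest) = msplit ([] ++ [c]) rest by rw [msplit, if_neg hc]]
      rw [ih ([] ++ [c])]
      simp [hc]

theorem msplit_append (xs : List Char) : ∀ (pre rest : List Char), (∀ c ∈ xs, ¬ c = '.') →
    msplit pre (xs ++ rest) = msplit (pre ++ xs) rest := by
  induction xs with
  | nil => intro pre rest _; simp
  | cons x xs ih =>
    intro pre rest h
    rw [List.cons_append, msplit, if_neg (h x (List.mem_cons_self))]
    rw [ih (pre ++ [x]) rest (fun c hc => h c (List.mem_cons_of_mem _ hc))]
    simp

theorem aScan_spec (seg : List Char) : ∀ (k j : Nat), seg.length - j ≤ k → j ≤ seg.length →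
    aScan seg j = j + ((seg.drop j).takeWhile (fun x => vchars.contains x)).length := by
  intro k
  induction k with
  | zero =>
    intro j hk hj
    have : j = seg.length := by omega
    subst this
    rw [aScan]
    simp
  | succ k ih =>
    intro j hk hj
    rw [aScan]
    by_cases h : j < seg.length
    · rw [dif_pos h]
      rw [List.drop_eq_getElem_cons h]
      by_cases hw : seg[j] ∈ vchars
      · have hw' : vchars.contains seg[j] = true := by simpa using hw
        rw [if_pos hw', ih (j+1) (by omega) (by omega), List.takeWhile_cons, hw']
        simp only [if_true, List.length_cons]
        omega
      · have hw' : vchars.contains seg[j] = false := by simpa using hw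
        rw [if_neg (fun hc => hw (by simpa using hc)), List.takeWhile_cons, hw']
        simp
    · rw [dif_neg h]
      have : j = seg.length := by omega
      subst this
      simp

theorem mem_vchars_ne_dot {x : Char} (h : x ∈ vchars) : ¬ x = '.' := by
  intro he; subst he; revert h; decide

theorem mem_vstart_ne_dot {x : Char} (h : vchars_start.contains x = true) : ¬ x = '.' := by
  intro he; subst he; revert h; decide

theorem takeWhile_after_drop (ds : List Char) :
    List.takeWhile (fun x => vchars.contains x)
      ((ds.dropWhile (fun x => vchars.contains x)).takeWhile (fun c => !(c == '.'))) = [] := by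
  cases hdw : ds.dropWhile (fun x => vchars.contains x) with
  | nil => simp
  | cons x xs =>
    have hne : ds.dropWhile (fun x => vchars.contains x) ≠ [] := by
      rw [hdw]; exact List.cons_ne_nil _ _
    have hx0 := List.head_dropWhile_not (fun x => vchars.contains x) hne
    simp only [hdw, List.head_cons] at hx0
    have hx : vchars.contains x = false := by simpa using hx0
    rw [List.takeWhile_cons]
    by_cases hq : x = '.'
    · simp [hq]
    · rw [if_pos (by simpa using hq), List.takeWhile_cons, hx]
      simp

theorem tok_head_none (l : List Char)
    (h : ∀ c cs, l.takeWhile (fun c => !(c == '.')) = c :: cs → vchars_start.contains c = false) :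
    tok (l.takeWhile (fun c => !(c == '.'))) = none := by
  cases htw : l.takeWhile (fun c => !(c == '.')) with
  | nil => rfl
  | cons c cs =>
    have hc' : c ∉ vchars_start := by simpa using h c cs htw
    simp [tok, hc']

theorem bAux_skip (c : Char) (rest : List Char) (hc : ¬ c = '.') :
    bAux (c :: rest) = bAux rest := by
  rw [bAux.eq_def]; dsimp only []; rw [if_neg hc]

theorem bAux_dot_nil : bAux ['.'] = [] := by
  rw [bAux.eq_def]; dsimp only []; rw [if_pos rfl]

theorem bAux_dot_start (d : Char) (ds : List Char) (hd : vchars_start.contains d = true) :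
    bAux ('.' :: d :: ds) =
      String.mk (d :: ds.takeWhile (fun x => vchars.contains x)) ::
        bAux (ds.dropWhile (fun x => vchars.contains x)) := by
  rw [bAux.eq_def]; dsimp only []; rw [if_pos rfl, if_pos hd]

theorem bAux_dot_nostart (d : Char) (ds : List Char) (hd : ¬ vchars_start.contains d = true) :
    bAux ('.' :: d :: ds) = bAux (d :: ds) := by
  rw [bAux.eq_def]; dsimp only []; rw [if_pos rfl, if_neg hd]

theorem portB_aux : ∀ (n : Nat) (l : List Char), l.length ≤ n →
    bAux l = List.filterMap tok ((msplit [] l).drop 1) := by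
  intro n
  induction n with
  | zero =>
    intro l hl
    have : l = [] := List.length_eq_zero_iff.mp (Nat.le_zero.mp hl)
    subst this
    simp [bAux, msplit]
  | succ n ih =>
    intro l hl
    match l with
    | [] => simp [bAux, msplit]
    | c :: rest =>
      by_cases hc : c = '.'
      · subst hc
        rw [show msplit [] ('.' :: rest) = [] :: msplit [] rest from by rw [msplit]; simp]
        rw [List.drop_succ_cons, List.drop_zero]
        match rest with
        | [] => simp [bAux_dot_nil, msplit, tok]
        | d :: ds =>
          by_cases hd : vchars_start.contains d = true
          · rw [bAux_dot_start d ds hd]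
            have hsplit : d :: ds =
                (d :: ds.takeWhile (fun x => vchars.contains x)) ++
                  ds.dropWhile (fun x => vchars.contains x) := by
              simp
            rw [hsplit, msplit_append _ _ _ (by
              intro x hx
              rcases List.mem_cons.mp hx with h1 | h1
              · subst h1; exact mem_vstart_ne_dot hd
              · exact mem_vchars_ne_dot (by simpa using (List.mem_takeWhile_imp h1)))]
            rw [msplit_shape]
            simp only [List.nil_append, List.cons_append]
            rw [List.filterMap_cons]
            have htw : List.takeWhile (fun x => vchars.contains x)
                ((ds.takeWhile (fun x => vchars.contains x)) ++
                  ((ds.dropWhile (fun x => vchars.contains x)).takeWhile (fun c => !(c == '.')))) =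
                ds.takeWhile (fun x => vchars.contains x) := by
              rw [List.takeWhile_append_of_pos (fun x hx => List.mem_takeWhile_imp hx),
                takeWhile_after_drop, List.append_nil]
            have hlen : (ds.dropWhile (fun x => vchars.contains x)).length ≤ n := by
              have h1 := List.length_dropWhile_le (fun x => vchars.contains x) ds
              simp at hl
              omega
            rw [ih _ hlen, List.drop_one]
            have hd' : d ∈ vchars_start := by simpa using hd
            simp only [tok]
            rw [if_pos hd, htw]
          · rw [bAux_dot_nostart d ds hd]
            rw [ih (d :: ds) (by simpa using Nat.le_of_succ_le_succ hl)]
            rw [msplit_shape]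
            simp only [List.nil_append, List.drop_succ_cons, List.drop_zero]
            rw [List.filterMap_cons]
            rw [tok_head_none]
            intro c' cs' htw
            by_cases hdd : d = '.'
            · rw [List.takeWhile_cons] at htw
              simp [hdd] at htw
            · rw [List.takeWhile_cons] at htw
              rw [if_pos (by simpa using hdd)] at htw
              cases htw
              simpa using hd
      · rw [bAux_skip c rest hc, ih rest (by simpa using Nat.le_of_succ_le_succ hl)]
        rw [show msplit [] (c :: rest) = msplit ([] ++ [c]) rest from by rw [msplit, if_neg hc]]
        rw [msplit_shape rest ([] ++ [c]), msplit_shape rest []]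
        simp

theorem foldl_body (segs : List (List Char)) : ∀ (acc : List String),
    segs.foldl (fun vs seg =>
      if PySem.List.len seg = 0 then vs
      else if !(vchars_start.contains (PySem.List.pyGetD seg 0 ' ')) then vs
      else vs ++ [String.mk (PySem.List.slice seg (some 0) (some ((aScan seg 1 : Nat) : Int)))]) acc
    = acc ++ List.filterMap tok segs := by
  induction segs with
  | nil => intro acc; simp
  | cons seg segs ih =>
    intro acc
    rw [List.foldl_cons, List.filterMap_cons]
    match seg with
    | [] =>
      rw [if_pos (by simp [PySem.List.len])]
      rw [ih acc]
      rfl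
    | c :: cs =>
      rw [if_neg (by simp [PySem.List.len]; omega)]
      have hget : PySem.List.pyGetD (c :: cs) 0 ' ' = c := by simp [pysem]
      rw [hget]
      by_cases hc : vchars_start.contains c = true
      · rw [if_neg (by simpa using hc)]
        have hscan : aScan (c :: cs) 1 = 1 + (cs.takeWhile (fun x => vchars.contains x)).length := by
          have := aScan_spec (c :: cs) (c :: cs).length 1 (by omega) (by simp)
          simpa using this
        have hslice : PySem.List.slice (c :: cs) (some 0) (some ((aScan (c :: cs) 1 : Nat) : Int))
            = c :: cs.takeWhile (fun x => vchars.contains x) := by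
          rw [hscan, Nat.add_comm 1 _]
          rw [show PySem.List.slice (c :: cs) (some 0) (some (((cs.takeWhile (fun x => vchars.contains x)).length + 1 : Nat) : Int)) = (c :: cs).take ((cs.takeWhile (fun x => vchars.contains x)).length + 1) from by
            rw [show ((0:Int)) = ((0:Nat):Int) from rfl, PySem.List.slice_natCast]
            simp]
          rw [List.take_succ_cons]
          rw [(List.prefix_iff_eq_take.mp (List.takeWhile_prefix _)).symm]
        rw [hslice, ih]
        have hc' : c ∈ vchars_start := by simpa using hc
        simp [tok, hc']
      · rw [if_pos (by simpa using hc)]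
        rw [ih acc]
        have hc' : c ∉ vchars_start := by simpa using hc
        simp [tok, hc']

theorem portA_eq (s : String) :
    get_dot_vars s = List.filterMap tok ((msplit [] s.toList).drop 1) := by
  unfold get_dot_vars
  rw [splitOn_eq_msplit]
  rw [PySem.List.foldl_pyRange_pyGetD (msplit [] s.toList) [] (fun vs seg =>
    if PySem.List.len seg = 0 then vs
    else if !(vchars_start.contains (PySem.List.pyGetD seg 0 ' ')) then vs
    else vs ++ [String.mk (PySem.List.slice seg (some 0) (some ((aScan seg 1 : Nat) : Int)))]) [] (by norm_num)]
  rw [show ((1:Int)).toNat = 1 from rfl]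
  rw [foldl_body]
  simp

theorem portB_eq (l : List Char) :
    bAux l = List.filterMap tok ((msplit [] l).drop 1) :=
  portB_aux l.length l (Nat.le_refl _)

-- ===== VERDICT (by name: the statement is the Claim_ definition above) =====
theorem get_dot_vars_spec : Claim_equal_get_dot_vars := by
  intro s _
  unfold Spec_get_dot_vars get_dot_vars_alt
  rw [portA_eq, portB_eq]
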